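-- pv_equiv track=rewrite | github.com/mmalvino/OS_assignment2_disk-scheduling | main.py | optimized_scan
-- ===== SOURCE A (Python) =====
-- def optimized_scan(requests, initial_position):
--     # Split requests based on the initial position
--     lower_half = [r for r in requests if r <= initial_position]
--     upper_half = [r for r in requests if r > initial_position]
--
--     total_movements = 0
--
--     # Process lower half with SCAN
--     if lower_half:
--         lower_half.sort(reverse=True)
--         total_movements += calculate_head_movements(lower_half, initial_position)
--
--     # Process upper half with SCAN
--     if upper_half:
--         upper_half.sort()
--         if lower_half:
--             total_movements += abs(lower_half[0] - upper_half[0])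
--             total_movements += calculate_head_movements(upper_half, upper_half[0])
--         else:
--             total_movements += calculate_head_movements(upper_half, initial_position)
--
--     return total_movements
--
-- def calculate_head_movements(requests, initial_position):
--     movements = 0
--     current_position = initial_position
--     for request in requests:
--         movements += abs(request - current_position)
--         current_position = request
--     return movements
-- ===== SOURCE B (Python) =====
-- def optimized_scan(requests, initial_position):
--     # One O(n) pass tracking min/max of each half; closed-form total (no sorting).
--     lo_min = lo_max = hi_min = hi_max = None
--     for r in requests:
--         if r <= initial_position:
--             if lo_min is None:
--                 lo_min = lo_max = r
--             else:
--                 if r < lo_min: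
--                     lo_min = r
--                 if r > lo_max:
--                     lo_max = r
--         else:
--             if hi_min is None:
--                 hi_min = hi_max = r
--             else:
--                 if r < hi_min:
--                     hi_min = r
--                 if r > hi_max:
--                     hi_max = r
--     total = 0
--     if lo_min is not None:
--         total += initial_position - lo_min
--     if hi_min is not None:
--         total += (hi_max - hi_min) + (hi_min - (lo_max if lo_max is not None else initial_position))
--     return total
-- ===== Notes on version B (the rewrite author's own statement) =====
-- stated objective: faster
-- what changed: Replaces the two sorts and the telescoping walk over each sorted half by a single pass that tracks min/max of each half and a closed-form total.
import Mathlib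
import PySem

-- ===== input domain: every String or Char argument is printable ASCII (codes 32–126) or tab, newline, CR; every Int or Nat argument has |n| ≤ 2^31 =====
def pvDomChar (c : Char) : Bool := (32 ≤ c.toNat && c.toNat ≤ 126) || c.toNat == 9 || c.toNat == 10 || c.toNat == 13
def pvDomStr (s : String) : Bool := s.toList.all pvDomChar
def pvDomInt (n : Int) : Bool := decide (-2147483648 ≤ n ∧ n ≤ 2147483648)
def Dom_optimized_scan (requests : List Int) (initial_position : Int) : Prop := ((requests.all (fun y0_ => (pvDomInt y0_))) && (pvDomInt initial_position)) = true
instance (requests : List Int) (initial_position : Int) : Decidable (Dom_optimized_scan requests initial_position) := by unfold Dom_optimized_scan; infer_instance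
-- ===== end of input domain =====

-- B replaces A's two sorts and half-walks by one O(n) min/max pass with a closed-form total (objective: faster, asymptotic).

-- ===== PORT A =====
-- port of calculate_head_movements: fold over (movements, current_position)
def pvChm (requests : List Int) (initial_position : Int) : Int :=
  (requests.foldl (fun (st : Int × Int) r => (st.1 + |r - st.2|, r)) (0, initial_position)).1

def optimized_scan (requests : List Int) (initial_position : Int) : Int :=
  let lower_half := requests.filter (fun r => decide (r ≤ initial_position))
  let upper_half := requests.filter (fun r => decide (initial_position < r))
  let total : Int := 0
  -- lower_half.sort(reverse=True) happens only inside the if, but sorting is a no-op on []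
  let lowerS := if lower_half ≠ [] then PySem.List.sorted lower_half (fun x => x) true else lower_half
  let total := if lower_half ≠ [] then total + pvChm lowerS initial_position else total
  let total :=
    if upper_half ≠ [] then
      let upperS := PySem.List.sorted upper_half (fun x => x) false
      if lowerS ≠ [] then
        total + |(PySem.List.pyGet? lowerS 0).getD 0 - (PySem.List.pyGet? upperS 0).getD 0|
              + pvChm upperS ((PySem.List.pyGet? upperS 0).getD 0)
      else total + pvChm upperS initial_position
    else total
  total

-- ===== PORT B =====
def pvUpdMin (o : Option Int) (r : Int) : Option Int :=
  match o with
  | none => some r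
  | some v => some (if r < v then r else v)

def pvUpdMax (o : Option Int) (r : Int) : Option Int :=
  match o with
  | none => some r
  | some v => some (if r > v then r else v)

def pvStep (p : Int) (s : Option Int × Option Int × Option Int × Option Int) (r : Int) :
    Option Int × Option Int × Option Int × Option Int :=
  if r ≤ p then (pvUpdMin s.1 r, pvUpdMax s.2.1 r, s.2.2.1, s.2.2.2)
  else (s.1, s.2.1, pvUpdMin s.2.2.1 r, pvUpdMax s.2.2.2 r)

def optimized_scan_alt (requests : List Int) (initial_position : Int) : Int :=
  let s := requests.foldl (pvStep initial_position) (none, none, none, none)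
  let total : Int := 0
  let total := match s.1 with | some lm => total + (initial_position - lm) | none => total
  let total :=
    match s.2.2.1, s.2.2.2 with
    | some hm, some hM =>
        total + (hM - hm) + (hm - (match s.2.1 with | some lM => lM | none => initial_position))
    | _, _ => total
  total

-- ===== PRECONDITION & SPEC =====
def Spec_optimized_scan (requests : List Int) (initial_position : Int) (out : Int) : Prop := out = optimized_scan_alt requests initial_position
instance (requests : List Int) (initial_position : Int) (out : Int) : Decidable (Spec_optimized_scan requests initial_position out) := by unfold Spec_optimized_scan; infer_instance

-- ===== CLAIM (what is proved, stated in full; the proofs are below) =====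
def Claim_equal_optimized_scan : Prop := ∀ (requests : List Int) (initial_position : Int), Dom_optimized_scan requests initial_position → Spec_optimized_scan requests initial_position (optimized_scan requests initial_position)

-- ===== LEMMAS AND PROOFS =====


-- A's fold for calculate_head_movements: accumulator shifts out additively
theorem pvChm_shift (l : List Int) : ∀ (m c : Int),
    (l.foldl (fun (st : Int × Int) r => (st.1 + |r - st.2|, r)) (m, c)).1
      = m + (l.foldl (fun (st : Int × Int) r => (st.1 + |r - st.2|, r)) (0, c)).1 := by
  induction l with
  | nil => intro m c; simp
  | cons a t ih => intro m c; simp only [List.foldl_cons]; rw [ih, ih (0 + |a - c|)]; ring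

theorem pvChm_cons (a : Int) (l : List Int) (p : Int) :
    pvChm (a :: l) p = |a - p| + pvChm l a := by
  simp only [pvChm, List.foldl_cons]
  rw [pvChm_shift]; ring

theorem pvChm_desc (l : List Int) : ∀ (a p : Int),
    (a :: l).Pairwise (fun x y => y ≤ x) → a ≤ p →
    pvChm (a :: l) p = p - (a :: l).getLast (List.cons_ne_nil a l) := by
  induction l with
  | nil =>
      intro a p _ hap
      simp only [pvChm, List.foldl_cons, List.foldl_nil, List.getLast_singleton]
      rw [abs_sub_comm, abs_of_nonneg (by omega)]; ring
  | cons b t ih =>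
      intro a p hpw hap
      rw [List.pairwise_cons] at hpw
      have hba : b ≤ a := hpw.1 b (by simp)
      rw [pvChm_cons, ih b a hpw.2 hba, List.getLast_cons (List.cons_ne_nil b t)]
      rw [abs_sub_comm, abs_of_nonneg (by omega)]; ring

theorem pvChm_asc (l : List Int) : ∀ (a p : Int),
    (a :: l).Pairwise (fun x y => x ≤ y) → p ≤ a →
    pvChm (a :: l) p = (a :: l).getLast (List.cons_ne_nil a l) - p := by
  induction l with
  | nil =>
      intro a p _ hap
      simp only [pvChm, List.foldl_cons, List.foldl_nil, List.getLast_singleton]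
      rw [abs_of_nonneg (by omega)]; ring
  | cons b t ih =>
      intro a p hpw hap
      rw [List.pairwise_cons] at hpw
      have hab : a ≤ b := hpw.1 b (by simp)
      rw [pvChm_cons, ih b a hpw.2 hab, List.getLast_cons (List.cons_ne_nil b t)]
      rw [abs_of_nonneg (by omega)]; ring

theorem getLast_le_of_desc (l : List Int) : ∀ (a : Int),
    (a :: l).Pairwise (fun x y => y ≤ x) →
    ∀ x ∈ a :: l, (a :: l).getLast (List.cons_ne_nil a l) ≤ x := by
  induction l with
  | nil => intro a _ x hx; simp at hx; simp [hx]
  | cons b t ih =>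
      intro a hpw x hx
      rw [List.pairwise_cons] at hpw
      rw [List.getLast_cons (List.cons_ne_nil b t)]
      rcases List.mem_cons.mp hx with rfl | hx'
      · exact le_trans (ih b hpw.2 b (by simp)) (hpw.1 b (by simp))
      · exact ih b hpw.2 x hx'

theorem ge_getLast_of_asc (l : List Int) : ∀ (a : Int),
    (a :: l).Pairwise (fun x y => x ≤ y) →
    ∀ x ∈ a :: l, x ≤ (a :: l).getLast (List.cons_ne_nil a l) := by
  induction l with
  | nil => intro a _ x hx; simp at hx; simp [hx]
  | cons b t ih =>
      intro a hpw x hx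
      rw [List.pairwise_cons] at hpw
      rw [List.getLast_cons (List.cons_ne_nil b t)]
      rcases List.mem_cons.mp hx with rfl | hx'
      · exact le_trans (hpw.1 b (by simp)) (ih b hpw.2 b (by simp))
      · exact ih b hpw.2 x hx'

-- B's single fold over the four option-registers splits into folds over the two filters
theorem foldl_pvStep_split (p : Int) (xs : List Int) :
    ∀ (s : Option Int × Option Int × Option Int × Option Int),
    xs.foldl (pvStep p) s =
      ((xs.filter (fun r => decide (r ≤ p))).foldl pvUpdMin s.1,
       (xs.filter (fun r => decide (r ≤ p))).foldl pvUpdMax s.2.1,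
       (xs.filter (fun r => decide (p < r))).foldl pvUpdMin s.2.2.1,
       (xs.filter (fun r => decide (p < r))).foldl pvUpdMax s.2.2.2) := by
  induction xs with
  | nil => intro s; rfl
  | cons r t ih =>
      intro s
      by_cases h : r ≤ p
      · simp only [List.foldl_cons, List.filter_cons, decide_eq_true_eq,
          if_pos h, if_neg (by omega : ¬ p < r), List.foldl_cons]
        rw [ih]; simp [pvStep, h]
      · simp only [List.foldl_cons, List.filter_cons, decide_eq_true_eq,
          if_neg h, if_pos (by omega : p < r), List.foldl_cons]
        rw [ih]; simp [pvStep, h]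

theorem foldl_updmin_some (t : List Int) : ∀ (a : Int),
    t.foldl pvUpdMin (some a) = some (t.foldl min a) := by
  induction t with
  | nil => intro a; rfl
  | cons b t ih =>
      intro a
      simp only [List.foldl_cons, pvUpdMin]
      rw [ih]
      congr 1
      have : (if b < a then b else a) = min a b := by split_ifs <;> omega
      rw [this]

theorem foldl_updmax_some (t : List Int) : ∀ (a : Int),
    t.foldl pvUpdMax (some a) = some (t.foldl max a) := by
  induction t with
  | nil => intro a; rfl
  | cons b t ih =>
      intro a
      simp only [List.foldl_cons, pvUpdMax]
      rw [ih]
      congr 1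
      have : (if b > a then b else a) = max a b := by split_ifs <;> omega
      rw [this]

-- uniqueness of the minimum / maximum of a list
theorem int_min_unique {L : List Int} {m₁ m₂ : Int}
    (h₁ : m₁ ∈ L) (h₂ : ∀ x ∈ L, m₁ ≤ x) (h₃ : m₂ ∈ L) (h₄ : ∀ x ∈ L, m₂ ≤ x) : m₁ = m₂ :=
  le_antisymm (h₂ _ h₃) (h₄ _ h₁)

-- foldl min / foldl max are the min / max of the cons list
theorem foldl_min_mem (t : List Int) : ∀ (a : Int), t.foldl min a ∈ a :: t := by
  induction t with
  | nil => simp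
  | cons b t ih =>
      intro a
      simp only [List.foldl_cons]
      rcases List.mem_cons.mp (ih (min a b)) with h' | h'
      · rcases min_choice a b with hc | hc <;> rw [hc] at h' ⊢ <;> simp [h']
      · simp [h']

theorem foldl_min_le (t : List Int) : ∀ (a : Int), ∀ x ∈ a :: t, t.foldl min a ≤ x := by
  induction t with
  | nil => intro a x hx; simp at hx; simp [hx]
  | cons b t ih =>
      intro a x hx
      simp only [List.foldl_cons]
      have h1 : t.foldl min (min a b) ≤ min a b := ih (min a b) _ (by simp)
      rcases List.mem_cons.mp hx with rfl | hx'
      · exact le_trans h1 (min_le_left _ _)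
      rcases List.mem_cons.mp hx' with rfl | hx''
      · exact le_trans h1 (min_le_right _ _)
      · exact ih (min a b) x (by simp [hx''])

theorem foldl_max_mem (t : List Int) : ∀ (a : Int), t.foldl max a ∈ a :: t := by
  induction t with
  | nil => simp
  | cons b t ih =>
      intro a
      simp only [List.foldl_cons]
      rcases List.mem_cons.mp (ih (max a b)) with h' | h'
      · rcases max_choice a b with hc | hc <;> rw [hc] at h' ⊢ <;> simp [h']
      · simp [h']

theorem foldl_max_ge (t : List Int) : ∀ (a : Int), ∀ x ∈ a :: t, x ≤ t.foldl max a := by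
  induction t with
  | nil => intro a x hx; simp at hx; simp [hx]
  | cons b t ih =>
      intro a x hx
      simp only [List.foldl_cons]
      have h1 : max a b ≤ t.foldl max (max a b) := ih (max a b) _ (by simp)
      rcases List.mem_cons.mp hx with rfl | hx'
      · exact le_trans (le_max_left _ _) h1
      rcases List.mem_cons.mp hx' with rfl | hx''
      · exact le_trans (le_max_right _ _) h1
      · exact ih (max a b) x (by simp [hx''])

-- ===== VERDICT (by name: the statement is the Claim_ definition above) =====
theorem pvUpdMin_none (r : Int) : pvUpdMin none r = some r := rfl
theorem pvUpdMax_none (r : Int) : pvUpdMax none r = some r := rfl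

theorem int_max_unique {L : List Int} {m₁ m₂ : Int}
    (h₁ : m₁ ∈ L) (h₂ : ∀ x ∈ L, x ≤ m₁) (h₃ : m₂ ∈ L) (h₄ : ∀ x ∈ L, x ≤ m₂) : m₁ = m₂ :=
  le_antisymm (h₄ _ h₁) (h₂ _ h₃)

theorem optimized_scan_spec : Claim_equal_optimized_scan := by
  intro requests p _
  unfold Spec_optimized_scan
  simp only [optimized_scan, optimized_scan_alt]
  rw [foldl_pvStep_split]
  set L := requests.filter (fun r => decide (r ≤ p)) with hLdef
  set U := requests.filter (fun r => decide (p < r)) with hUdef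
  have hLle : ∀ x ∈ L, x ≤ p := by
    intro x hx; have := List.of_mem_filter hx; simpa using this
  have hUgt : ∀ x ∈ U, p < x := by
    intro x hx; have := List.of_mem_filter hx; simpa using this
  cases hL : L with
  | nil =>
      cases hU : U with
      | nil => simp
      | cons u v =>
          obtain ⟨w, t', hsU⟩ : ∃ w t', PySem.List.sorted (u :: v) (fun x : Int => x) false = w :: t' := by
            cases h : PySem.List.sorted (u :: v) (fun x : Int => x) false with
            | nil => exact absurd ((PySem.List.sorted_eq_nil_iff _ _ _).mp h) (by simp)
            | cons w t' => exact ⟨w, t', rfl⟩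
          have hpw : (w :: t').Pairwise (fun x y : Int => x ≤ y) := by
            have h := PySem.List.sorted_pairwise (xs := u :: v) (key := fun x : Int => x)
            rw [hsU] at h; exact h
          have hmem : ∀ x : Int, x ∈ w :: t' ↔ x ∈ u :: v := by
            intro x; rw [← hsU]; exact PySem.List.mem_sorted _ _ _ x
          have hwU : p < w := hUgt w (hU ▸ (hmem w).mp (by simp))
          have hlast : (w :: t').getLast (List.cons_ne_nil w t') = v.foldl max u := by
            refine int_max_unique ((hmem _).mp (List.getLast_mem _)) ?_ (foldl_max_mem v u) (foldl_max_ge v u)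
            intro x hx; exact ge_getLast_of_asc t' w hpw x ((hmem x).mpr hx)
          have hchm : pvChm (w :: t') p = v.foldl max u - p := by
            rw [pvChm_asc t' w p hpw (le_of_lt hwU), hlast]
          have hmin : v.foldl min u ≤ v.foldl max u :=
            le_trans (foldl_min_le v u u (by simp)) (foldl_max_ge v u u (by simp))
          simp [hsU, hchm, pvUpdMin_none, pvUpdMax_none, foldl_updmin_some, foldl_updmax_some]
  | cons a t =>
      obtain ⟨m, tL, hsL⟩ : ∃ m tL, PySem.List.sorted (a :: t) (fun x : Int => x) true = m :: tL := by
        cases h : PySem.List.sorted (a :: t) (fun x : Int => x) true with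
        | nil => exact absurd ((PySem.List.sorted_eq_nil_iff _ _ _).mp h) (by simp)
        | cons m tL => exact ⟨m, tL, rfl⟩
      have hpwL : (m :: tL).Pairwise (fun x y : Int => y ≤ x) := by
        have h := PySem.List.sorted_pairwise_rev (xs := a :: t) (key := fun x : Int => x)
        rw [hsL] at h; exact h
      have hmemL : ∀ x : Int, x ∈ m :: tL ↔ x ∈ a :: t := by
        intro x; rw [← hsL]; exact PySem.List.mem_sorted _ _ _ x
      have hmL : m ≤ p := hLle m (hL ▸ (hmemL m).mp (by simp))
      -- m is the max of L, getLast the min of L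
      have hmmax : m = t.foldl max a := by
        refine int_max_unique ((hmemL m).mp (by simp)) ?_ (foldl_max_mem t a) (foldl_max_ge t a)
        intro x hx
        exact PySem.List.key_head_sorted_rev_ge _ (fun x : Int => x) hsL x hx
      have hlastL : (m :: tL).getLast (List.cons_ne_nil m tL) = t.foldl min a := by
        refine int_min_unique ((hmemL _).mp (List.getLast_mem _)) ?_ (foldl_min_mem t a) (foldl_min_le t a)
        intro x hx; exact getLast_le_of_desc tL m hpwL x ((hmemL x).mpr hx)
      have hchmL : pvChm (m :: tL) p = p - t.foldl min a := by
        rw [pvChm_desc tL m p hpwL hmL, hlastL]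
      cases hU : U with
      | nil => simp [hsL, hchmL, pvUpdMin_none, foldl_updmin_some]
      | cons u v =>
          obtain ⟨w, tU, hsU⟩ : ∃ w tU, PySem.List.sorted (u :: v) (fun x : Int => x) false = w :: tU := by
            cases h : PySem.List.sorted (u :: v) (fun x : Int => x) false with
            | nil => exact absurd ((PySem.List.sorted_eq_nil_iff _ _ _).mp h) (by simp)
            | cons w tU => exact ⟨w, tU, rfl⟩
          have hpwU : (w :: tU).Pairwise (fun x y : Int => x ≤ y) := by
            have h := PySem.List.sorted_pairwise (xs := u :: v) (key := fun x : Int => x)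
            rw [hsU] at h; exact h
          have hmemU : ∀ x : Int, x ∈ w :: tU ↔ x ∈ u :: v := by
            intro x; rw [← hsU]; exact PySem.List.mem_sorted _ _ _ x
          have hwU : p < w := hUgt w (hU ▸ (hmemU w).mp (by simp))
          -- w is the min of U, getLast the max of U
          have hwmin : w = v.foldl min u := by
            refine int_min_unique ((hmemU w).mp (by simp)) ?_ (foldl_min_mem v u) (foldl_min_le v u)
            intro x hx
            exact PySem.List.key_head_sorted_le _ (fun x : Int => x) hsU x hx
          have hlastU : (w :: tU).getLast (List.cons_ne_nil w tU) = v.foldl max u := by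
            refine int_max_unique ((hmemU _).mp (List.getLast_mem _)) ?_ (foldl_max_mem v u) (foldl_max_ge v u)
            intro x hx; exact ge_getLast_of_asc tU w hpwU x ((hmemU x).mpr hx)
          have hchmU : pvChm (w :: tU) w = v.foldl max u - w := by
            rw [pvChm_asc tU w w hpwU (le_refl w), hlastU]
          have habs : |m - w| = w - m := by
            rw [abs_sub_comm, abs_of_nonneg (by omega)]
          simp [hsL, hsU, hchmL, hchmU, habs, pvUpdMin_none, pvUpdMax_none,
            foldl_updmin_some, foldl_updmax_some, PySem.List.pyGet?, PySem.List.pyIdx?]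
          rw [hmmax, hwmin]
          ring
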